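-- pv_equiv track=rewrite | github.com/MrBrantCode/unitest_baseline | mut_generate/mist_train_cf/cf_86241/solution.py | count_duplicates
-- ===== SOURCE A (Python) =====
-- def count_duplicates(lst):
--     # Create an empty dictionary to store the count of each element
--     count_dict = {}
--     # Create an empty list to store the unique elements with their counts
--     unique_list = []
--
--     # Iterate through the input list
--     for num in lst:
--         # Check if the element is already in the dictionary
--         if num in count_dict:
--             # If it is, increment its count by 1
--             count_dict[num] += 1
--         else:
--             # If it is not, add it to the dictionary with a count of 1
--             count_dict[num] = 1
--
--     # Iterate through the input list again
--     for num in lst: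
--         # Check if the count of the element is greater than 0
--         if count_dict[num] > 0:
--             # If it is, add the element and its count as a tuple to the unique list
--             unique_list.append((num, count_dict[num]))
--             # Set the count of the element to 0 to mark it as visited
--             count_dict[num] = 0
--
--     # Return the unique list
--     return unique_list
-- ===== SOURCE B (Python) =====
-- def count_duplicates(lst):
--     # Single pass: build the result list directly; index_of maps each seen
--     # value to its position in result, and we bump that pair in place.
--     result = []
--     index_of = {}
--     for num in lst:
--         if num in index_of:
--             i = index_of[num]
--             result[i] = (num, result[i][1] + 1)
--         else:
--             index_of[num] = len(result)
--             result.append((num, 1))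
--     return result
-- ===== Notes on version B (the rewrite author's own statement) =====
-- stated objective: alternative
-- what changed: B is a single pass that constructs the output list directly, keeping a value-to-output-index map and incrementing the affected output pair in place, instead of A's two staged passes (build a count dict, then re-scan the input zeroing counts to dedupe).
import Mathlib
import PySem

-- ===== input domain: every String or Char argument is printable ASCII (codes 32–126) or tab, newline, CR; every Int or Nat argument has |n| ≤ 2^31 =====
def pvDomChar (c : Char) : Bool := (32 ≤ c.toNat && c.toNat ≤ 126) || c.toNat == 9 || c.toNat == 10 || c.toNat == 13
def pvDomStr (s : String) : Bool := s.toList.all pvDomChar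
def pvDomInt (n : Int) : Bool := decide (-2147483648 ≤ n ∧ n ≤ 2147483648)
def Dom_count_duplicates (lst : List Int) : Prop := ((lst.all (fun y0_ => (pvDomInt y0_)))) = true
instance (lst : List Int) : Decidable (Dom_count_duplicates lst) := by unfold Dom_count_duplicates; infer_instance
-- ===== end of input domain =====

-- B replaces A's two staged passes (count dict, then re-scan the input zeroing counts) with a
-- single pass that builds the output list directly, keeping a value→output-index map and
-- bumping the affected output pair in place (objective: alternative).

-- ===== PORT A =====
def count_duplicates (lst : List Int) : List (Int × Int) :=
  -- first loop: build count_dict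
  let count_dict : PySem.Dict Int Int :=
    lst.foldl (fun d num =>
      if d.contains num then d.insert num (d.getD num 0 + 1)
      else d.insert num 1) PySem.Dict.empty
  -- second loop over lst: emit and zero out
  let st :=
    lst.foldl (fun (p : PySem.Dict Int Int × List (Int × Int)) num =>
      if 0 < p.1.getD num 0 then
        (p.1.insert num 0, p.2 ++ [(num, p.1.getD num 0)])
      else p) (count_dict, [])
  st.2

-- ===== PORT B =====
-- loop body of Source B: state = (result, index_of); index positions are Nat (always valid by the
-- loop's own invariant, so Python's result[i] read/write is List.getD / List.set at an in-range index)
def cdStep (st : List (Int × Int) × PySem.Dict Int Nat) (num : Int) :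
    List (Int × Int) × PySem.Dict Int Nat :=
  if st.2.contains num then
    let i := st.2.getD num 0
    (st.1.set i (num, (st.1.getD i (num, 0)).2 + 1), st.2)
  else
    (st.1 ++ [(num, 1)], st.2.insert num st.1.length)

def count_duplicates_alt (lst : List Int) : List (Int × Int) :=
  (lst.foldl cdStep ([], PySem.Dict.empty)).1

-- ===== PRECONDITION & SPEC =====
def Spec_count_duplicates (lst : List Int) (out : List (Int × Int)) : Prop := out = count_duplicates_alt lst
instance (lst : List Int) (out : List (Int × Int)) : Decidable (Spec_count_duplicates lst out) := by unfold Spec_count_duplicates; infer_instance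

-- ===== CLAIM (what is proved, stated in full; the proofs are below) =====
def Claim_equal_count_duplicates : Prop := ∀ (lst : List Int), Dom_count_duplicates lst → Spec_count_duplicates lst (count_duplicates lst)

-- ===== LEMMAS AND PROOFS =====

-- the canonical result both programs compute: first occurrences paired with total counts
def cdSpec (lst : List Int) : List (Int × Int) :=
  (PySem.Set.ofList lst).map (fun k => (k, (lst.count k : Int)))

-- ---------- A-side ----------

-- A's build loop is exactly the counter loop (the else-branch inserts 1 = 0 + 1).
theorem buildA_eq_counter (lst : List Int) :
    lst.foldl (fun d num =>
      if d.contains num then d.insert num (d.getD num 0 + 1)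
      else d.insert num 1) PySem.Dict.empty = PySem.Dict.counter lst := by
  rw [PySem.List.foldl_congr_mem lst _ (fun d x => d.insert x (d.getD x 0 + 1)) _ ?_,
      PySem.Dict.foldl_insert_getD_add_one_eq_counter]
  intro acc x _
  cases hc : acc.contains x with
  | true => simp
  | false =>
    rw [if_neg (by simp)]
    show acc.insert x 1 = acc.insert x (acc.getD x 0 + 1)
    rw [PySem.Dict.getD_of_not_contains _ _ hc]
    norm_num

theorem foldl_add_filter_ne {x : Int} (t : List Int) (s : PySem.Set Int) (hx : x ∈ s) :
    (t.filter (· ≠ x)).foldl PySem.Set.add s = t.foldl PySem.Set.add s := by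
  induction t generalizing s with
  | nil => rfl
  | cons y t ih =>
    by_cases hy : y = x
    · subst hy
      rw [List.filter_cons_of_neg (by simp), List.foldl_cons, PySem.Set.add_of_mem hx]
      exact ih s hx
    · rw [List.filter_cons_of_pos (by simp [hy]), List.foldl_cons, List.foldl_cons]
      exact ih _ ((PySem.Set.mem_add _ _ _).mpr (Or.inl hx))

theorem foldl_add_cons_of_not_mem {x : Int} (t : List Int) (s : PySem.Set Int)
    (h : ∀ y ∈ t, y ≠ x) :
    t.foldl PySem.Set.add (x :: s) = x :: t.foldl PySem.Set.add s := by
  induction t generalizing s with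
  | nil => rfl
  | cons y t ih =>
    have hy : y ≠ x := h y (by simp)
    have hmem : y ∈ (x :: s : List Int) ↔ y ∈ s := by simp [hy]
    simp only [List.foldl_cons]
    rw [PySem.Set.add_eq_ite, PySem.Set.add_eq_ite (s := s)]
    by_cases hs : y ∈ s
    · rw [if_pos (hmem.mpr hs), if_pos hs]
      exact ih s (fun z hz => h z (by simp [hz]))
    · rw [if_neg (fun hm => hs (hmem.mp hm)), if_neg hs]
      have hx : (x :: s) ++ [y] = x :: (s ++ [y]) := by simp
      rw [hx]
      exact ih _ (fun z hz => h z (by simp [hz]))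

-- set(x :: t) = x :: set(t with x removed)
theorem ofList_cons_eq (x : Int) (t : List Int) :
    PySem.Set.ofList (x :: t) = x :: PySem.Set.ofList (t.filter (· ≠ x)) := by
  rw [PySem.Set.ofList_eq_foldl, PySem.Set.ofList_eq_foldl]
  have h1 : (x :: t).foldl PySem.Set.add [] = t.foldl PySem.Set.add [x] := by
    simp [PySem.Set.add]
  rw [h1, ← foldl_add_filter_ne (x := x) t ([x] : PySem.Set Int) (by simp)]
  exact foldl_add_cons_of_not_mem (t.filter (· ≠ x)) []
    (fun y hy => by simpa using (List.of_mem_filter hy))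

-- the second pass of A, characterized: it emits, in first-occurrence order, each element whose
-- current count is positive, paired with that count
theorem pass2_spec (l : List Int) (d : PySem.Dict Int Int) (acc : List (Int × Int)) :
    (l.foldl (fun (p : PySem.Dict Int Int × List (Int × Int)) num =>
      if 0 < p.1.getD num 0 then
        (p.1.insert num 0, p.2 ++ [(num, p.1.getD num 0)])
      else p) (d, acc)).2
    = acc ++ (PySem.Set.ofList (l.filter (fun x => decide (0 < d.getD x 0)))).map
        (fun k => (k, d.getD k 0)) := by
  induction l generalizing d acc with
  | nil => simp [PySem.Set.ofList]
  | cons x l ih =>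
    by_cases hx : 0 < d.getD x 0
    · simp only [List.foldl_cons, if_pos hx]
      rw [ih]
      have hfilt : l.filter (fun y => decide (0 < (d.insert x 0).getD y 0))
          = (l.filter (fun y => decide (0 < d.getD y 0))).filter (· ≠ x) := by
        rw [List.filter_filter]
        apply List.filter_congr
        intro y _
        by_cases hy : y = x
        · subst hy; simp
        · simp [PySem.Dict.getD_insert, hy]
      have hcons : (x :: l).filter (fun y => decide (0 < d.getD y 0))
          = x :: l.filter (fun y => decide (0 < d.getD y 0)) := by
        simp [hx]
      rw [hfilt, hcons, ofList_cons_eq]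
      have hmap : ∀ k ∈ PySem.Set.ofList ((l.filter (fun y => decide (0 < d.getD y 0))).filter (· ≠ x)),
          (k, (d.insert x 0).getD k 0) = (k, d.getD k 0) := by
        intro k hk
        have hk' : k ≠ x := by
          have hm := (PySem.Set.mem_ofList _ _).mp hk
          simpa using (List.of_mem_filter hm)
        rw [PySem.Dict.getD_insert]; rw [if_neg hk']
      rw [List.map_cons, List.map_congr_left hmap]
      simp
    · simp only [List.foldl_cons, if_neg hx]
      rw [ih]
      have : (x :: l).filter (fun y => decide (0 < d.getD y 0))
          = l.filter (fun y => decide (0 < d.getD y 0)) := by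
        simp [hx]
      rw [this]

theorem a_eq_spec (lst : List Int) : count_duplicates lst = cdSpec lst := by
  unfold count_duplicates cdSpec
  simp only [buildA_eq_counter]
  rw [pass2_spec]
  have hfilt : lst.filter (fun x => decide (0 < (PySem.Dict.counter lst).getD x 0)) = lst := by
    apply List.filter_eq_self.mpr
    intro x hx
    simp [PySem.Dict.getD_counter, List.count_pos_iff.mpr hx]
  rw [hfilt]
  simp only [List.nil_append]
  apply List.map_congr_left
  intro k hk
  have : k ∈ lst := (PySem.Set.mem_ofList _ _).mp hk
  simp [PySem.Dict.getD_counter]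

-- ---------- B-side ----------

-- loop invariant for B's single pass: after processing prefix p, the result list is cdSpec p and
-- index_of maps each element of p to its position in the deduplicated prefix
theorem b_loop_spec (l : List Int) (p : List Int) (res : List (Int × Int))
    (idx : PySem.Dict Int Nat)
    (hres : res = (PySem.Set.ofList p).map (fun k => (k, (p.count k : Int))))
    (hidx : ∀ k, idx.get? k =
      if k ∈ p then some ((PySem.Set.ofList p).idxOf k) else none) :
    (l.foldl cdStep (res, idx)).1
      = (PySem.Set.ofList (p ++ l)).map (fun k => (k, ((p ++ l).count k : Int))) := by
  induction l generalizing p res idx with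
  | nil => simpa using hres
  | cons x l ih =>
    rw [List.foldl_cons]
    have hconc : ∀ (st : List (Int × Int) × PySem.Dict Int Nat),
        (p ++ x :: l) = ((p ++ [x]) ++ l) := by intro _; simp
    rw [hconc (res, idx)]
    by_cases hxp : x ∈ p
    · -- seen before: update in place
      have hS : PySem.Set.ofList (p ++ [x]) = PySem.Set.ofList p := by
        rw [PySem.Set.ofList_append_singleton,
            PySem.Set.add_of_mem ((PySem.Set.mem_ofList _ _).mpr hxp)]
      have hxS : x ∈ PySem.Set.ofList p := (PySem.Set.mem_ofList _ _).mpr hxp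
      have hcontains : idx.contains x = true := by
        rw [PySem.Dict.contains_eq_isSome_get?, hidx x, if_pos hxp]; rfl
      have hi : idx.getD x 0 = (PySem.Set.ofList p).idxOf x := by
        rw [PySem.Dict.getD_eq_get?_getD, hidx x, if_pos hxp]; rfl
      have hilt : (PySem.Set.ofList p).idxOf x < (PySem.Set.ofList p).length :=
        List.idxOf_lt_length_of_mem hxS
      have hstep : cdStep (res, idx) x =
          (res.set ((PySem.Set.ofList p).idxOf x)
            (x, (res.getD ((PySem.Set.ofList p).idxOf x) (x, 0)).2 + 1), idx) := by
        unfold cdStep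
        rw [if_pos hcontains]
        simp only [hi]
      rw [hstep]
      apply ih (p ++ [x])
      · -- result invariant
        rw [hS, hres]
        have hget : ((PySem.Set.ofList p).map (fun k => (k, (p.count k : Int)))).getD
            ((PySem.Set.ofList p).idxOf x) (x, 0)
            = (x, (p.count x : Int)) := by
          rw [List.getD_eq_getElem?_getD, List.getElem?_eq_getElem (by simpa using hilt)]
          simp [List.getElem_idxOf hilt]
        rw [hget]
        apply List.ext_getElem (by simp)
        intro j hj1 hj2
        simp only [List.length_set, List.length_map] at hj1
        by_cases hji : j = (PySem.Set.ofList p).idxOf x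
        · subst hji
          rw [List.getElem_set_self]
          simp [List.getElem_idxOf hilt, List.count_append]
        · rw [List.getElem_set_ne (by omega)]
          simp only [List.getElem_map]
          have hne : (PySem.Set.ofList p)[j] ≠ x := by
            intro heq
            apply hji
            have := (PySem.Set.nodup_ofList (xs := p)).getElem_inj_iff
              (hi := hj1) (hj := by simpa using hilt) |>.mp
              (by rw [heq, List.getElem_idxOf hilt])
            omega
          simp [List.count_append, Ne.symm hne]
      · -- index invariant
        intro k
        rw [hidx k, hS]
        by_cases hk : k ∈ p
        · rw [if_pos hk, if_pos (by simp [hk])]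
        · rw [if_neg hk, if_neg (by simp [hk]; intro h; exact absurd (h ▸ hxp) hk)]
    · -- new element: append (x, 1)
      have hxS : x ∉ PySem.Set.ofList p := fun h => hxp ((PySem.Set.mem_ofList _ _).mp h)
      have hS : PySem.Set.ofList (p ++ [x]) = PySem.Set.ofList p ++ [x] := by
        rw [PySem.Set.ofList_append_singleton, PySem.Set.add_of_not_mem hxS]
      have hcontains : idx.contains x = false := by
        rw [PySem.Dict.contains_eq_isSome_get?, hidx x, if_neg hxp]; rfl
      have hstep : cdStep (res, idx) x = (res ++ [(x, 1)], idx.insert x res.length) := by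
        unfold cdStep
        rw [if_neg (by simp [hcontains])]
      rw [hstep]
      apply ih (p ++ [x])
      · rw [hS, hres, List.map_append]
        congr 1
        · apply List.map_congr_left
          intro k hk
          have hkx : k ≠ x := fun h => hxS (h ▸ hk)
          simp [List.count_append, Ne.symm hkx]
        · have : p.count x = 0 := List.count_eq_zero.mpr hxp
          simp [List.count_append, this]
      · intro k
        have hlen : res.length = (PySem.Set.ofList p).length := by rw [hres]; simp
        by_cases hkx : k = x
        · subst hkx
          rw [PySem.Dict.get?_insert_self, if_pos (by simp), hS,
              List.idxOf_append_of_notMem hxS, hlen]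
          simp [List.idxOf_cons_self]
        · rw [PySem.Dict.get?_insert_of_ne _ _ hkx, hidx k, hS]
          by_cases hk : k ∈ p
          · rw [if_pos hk, if_pos (by simp [hk]),
                List.idxOf_append_of_mem ((PySem.Set.mem_ofList _ _).mpr hk)]
          · rw [if_neg hk, if_neg (by simp [hk, hkx])]

theorem b_eq_spec (lst : List Int) : count_duplicates_alt lst = cdSpec lst := by
  unfold count_duplicates_alt cdSpec
  have := b_loop_spec lst [] [] PySem.Dict.empty (by simp [PySem.Set.ofList]) (by
    intro k; rw [PySem.Dict.get?_empty]; simp)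
  simpa using this

-- ===== VERDICT (by name: the statement is the Claim_ definition above) =====
theorem count_duplicates_spec : Claim_equal_count_duplicates := by
  intro lst _
  unfold Spec_count_duplicates
  rw [a_eq_spec, b_eq_spec]
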